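-- pv_equiv track=rewrite | github.com/RitaLB/INE5413_Grafos | trabalhos/T2/a2_com_testes/A2_1.py | addVerticeCFC
-- ===== SOURCE A (Python) =====
-- def addVerticeCFC(CFCs, A, C, v):
--     if A[v] == None:
--         if not C[v]:
--             CFCs[v+1] = [v+1]
--             C[v] = True
--         return CFCs, A, C, v
--     else:
--         CFCs, A, C, pai = addVerticeCFC(CFCs, A, C, A[v]-1)
--         if not C[v]:
--             CFCs[pai+1] += [v+1]
--             C[v] = True
--         return CFCs, A, C, pai
-- ===== SOURCE B (Python) =====
-- # Iterative two-phase version: walk the parent chain collecting vertices, then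
-- # mark from the root back down; same in-place mutations of CFCs and C as A.
-- def addVerticeCFC(CFCs, A, C, v):
--     chain = []
--     u = v
--     while A[u] is not None:
--         chain.append(u)
--         u = A[u] - 1
--     root = u
--     if not C[root]:
--         CFCs[root + 1] = [root + 1]
--         C[root] = True
--     for w in reversed(chain):
--         if not C[w]:
--             CFCs[root + 1] += [w + 1]
--             C[w] = True
--     return CFCs, A, C, root
-- ===== Notes on version B (the rewrite author's own statement) =====
-- stated objective: alternative
-- what changed: Replaces A's recursion (update-on-unwind) with an iterative two-phase walk: collect the parent chain into a list, handle the root, then mark the collected vertices in reverse order; same in-place mutations of CFCs and C.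
import Mathlib
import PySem

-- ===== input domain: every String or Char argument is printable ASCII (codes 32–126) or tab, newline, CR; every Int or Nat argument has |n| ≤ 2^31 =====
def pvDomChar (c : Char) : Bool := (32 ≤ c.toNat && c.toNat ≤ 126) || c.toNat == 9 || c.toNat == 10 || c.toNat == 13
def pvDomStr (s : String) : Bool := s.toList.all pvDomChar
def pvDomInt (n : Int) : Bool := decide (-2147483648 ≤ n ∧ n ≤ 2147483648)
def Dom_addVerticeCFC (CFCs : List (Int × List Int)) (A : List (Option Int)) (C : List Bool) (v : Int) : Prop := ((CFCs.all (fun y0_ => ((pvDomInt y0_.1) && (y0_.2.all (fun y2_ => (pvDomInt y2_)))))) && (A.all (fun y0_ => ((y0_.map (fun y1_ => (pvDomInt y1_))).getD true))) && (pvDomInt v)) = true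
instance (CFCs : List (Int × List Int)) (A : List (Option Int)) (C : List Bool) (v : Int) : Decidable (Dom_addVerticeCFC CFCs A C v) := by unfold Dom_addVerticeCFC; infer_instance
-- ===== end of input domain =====

-- B replaces A's recursion by an iterative chain walk then reverse marking; it performs
-- the same in-place mutations of CFCs and C as A, so equivalence of return values suffices.

-- ===== PORT A =====
-- A's recursion, fueled for totality: a terminating Python chain visits distinct
-- positions of A, so fuel A.length+1 always suffices inside Pre_; out-of-range
-- indices or exhausted fuel fall to the root branch (Python raises there; such
-- inputs are outside Pre_).
def addVerticeCFC_go (A : List (Option Int)) (fuel : Nat) (CFCs : PySem.Dict Int (List Int)) (C : List Bool) (v : Int) :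
    PySem.Dict Int (List Int) × List Bool × Int :=
  match fuel with
  | fuel' + 1 =>
    match PySem.List.pyGetD A v none with
    | some p =>
        let r := addVerticeCFC_go A fuel' CFCs C (p - 1)
        let pai := r.2.2
        if PySem.List.pyGet? r.2.1 v = some false then
          (PySem.Dict.modify r.1 (pai + 1) [] (· ++ [v + 1]), PySem.List.pySetD r.2.1 v true, pai)
        else (r.1, r.2.1, pai)
    | none =>
        if PySem.List.pyGet? C v = some false then
          (PySem.Dict.insert CFCs (v + 1) [v + 1], PySem.List.pySetD C v true, v)
        else (CFCs, C, v)
  | 0 =>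
      if PySem.List.pyGet? C v = some false then
        (PySem.Dict.insert CFCs (v + 1) [v + 1], PySem.List.pySetD C v true, v)
      else (CFCs, C, v)

def addVerticeCFC (CFCs : List (Int × List Int)) (A : List (Option Int)) (C : List Bool) (v : Int) : (List (Int × List Int)) × List (Option Int) × List Bool × Int :=
  let r := addVerticeCFC_go A (A.length + 1) (PySem.Dict.mk CFCs) C v
  (r.1.items, A, r.2.1, r.2.2)

-- ===== PORT B =====
-- phase 1: follow the parent pointers, collecting the visited vertices; final vertex is the root
def pvChainWalk (A : List (Option Int)) (fuel : Nat) (v : Int) : List Int × Int :=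
  match fuel with
  | fuel' + 1 =>
    match PySem.List.pyGetD A v none with
    | some p =>
        let r := pvChainWalk A fuel' (p - 1)
        (v :: r.1, r.2)
    | none => ([], v)
  | 0 => ([], v)

-- phase 2 body: mark one chain vertex, appending it to the root's group if unmarked
def pvMarkOne (root : Int) (st : PySem.Dict Int (List Int) × List Bool) (w : Int) :
    PySem.Dict Int (List Int) × List Bool :=
  if PySem.List.pyGet? st.2 w = some false then
    (PySem.Dict.modify st.1 (root + 1) [] (· ++ [w + 1]), PySem.List.pySetD st.2 w true)
  else st

def addVerticeCFC_alt (CFCs : List (Int × List Int)) (A : List (Option Int)) (C : List Bool) (v : Int) : (List (Int × List Int)) × List (Option Int) × List Bool × Int :=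
  let cw := pvChainWalk A (A.length + 1) v
  let root := cw.2
  let st0 :=
    if PySem.List.pyGet? C root = some false then
      (PySem.Dict.insert (PySem.Dict.mk CFCs) (root + 1) [root + 1], PySem.List.pySetD C root true)
    else (PySem.Dict.mk CFCs, C)
  let st := cw.1.reverse.foldl (pvMarkOne root) st0
  (st.1.items, A, st.2, root)

-- ===== PRECONDITION & SPEC =====
-- one parent step, defined only where Python can take it: v must be a valid (possibly
-- negative) index into both A and C, and A[v] must hold a parent; the next vertex is A[v]-1
def pvStep (A : List (Option Int)) (C : List Bool) (v : Int) : Option Int :=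
  match PySem.List.pyGet? A v, PySem.List.pyGet? C v with
  | some (some p), some _ => some (p - 1)
  | _, _ => none

-- k-th ancestor of v along parent pointers (none once a step is impossible)
def pvAnc (A : List (Option Int)) (C : List Bool) (v : Int) (k : Nat) : Option Int :=
  (fun o => o.bind (pvStep A C))^[k] (some v)

-- v is a root: a valid index of A and C whose A-entry is None
def pvIsRoot (A : List (Option Int)) (C : List Bool) (v : Int) : Bool :=
  PySem.List.pyGet? A v == some none && (PySem.List.pyGet? C v).isSome

-- Pre_ holds exactly on the inputs where Python A RETURNS: some k-th ancestor of v
-- (k ≤ len(A): a terminating chain visits distinct positions) is a root, every step to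
-- it being index-valid in A and C (else IndexError, or RecursionError on a cycle), and
-- no KeyError occurs on `CFCs[pai+1] += ...` — i.e. the root is unmarked (its key gets
-- inserted), or its key is already present, or every proper ancestor chain vertex is
-- already marked.
def Pre_addVerticeCFC (CFCs : List (Int × List Int)) (A : List (Option Int)) (C : List Bool) (v : Int) : Prop :=
  ∃ k ∈ List.range (A.length + 1),
    (pvAnc A C v k).any (fun r =>
      pvIsRoot A C r &&
      ((PySem.List.pyGet? C r == some false) ||
       (CFCs.map Prod.fst).contains (r + 1) ||
       (List.range k).all (fun j =>
         (pvAnc A C v j).all (fun u => PySem.List.pyGet? C u != some false)))) = true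
instance (CFCs : List (Int × List Int)) (A : List (Option Int)) (C : List Bool) (v : Int) : Decidable (Pre_addVerticeCFC CFCs A C v) := by unfold Pre_addVerticeCFC; infer_instance

def pvWitness_addVerticeCFC : (List (Int × List Int)) × List (Option Int) × List Bool × Int :=
  ([], [some 2, none], [false, false], 0)

def Spec_addVerticeCFC (CFCs : List (Int × List Int)) (A : List (Option Int)) (C : List Bool) (v : Int) (out : (List (Int × List Int)) × List (Option Int) × List Bool × Int) : Prop := out = addVerticeCFC_alt CFCs A C v
instance (CFCs : List (Int × List Int)) (A : List (Option Int)) (C : List Bool) (v : Int) (out : (List (Int × List Int)) × List (Option Int) × List Bool × Int) : Decidable (Spec_addVerticeCFC CFCs A C v out) := by unfold Spec_addVerticeCFC; infer_instance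

-- ===== CLAIM (what is proved, stated in full; the proofs are below) =====
def Claim_equal_addVerticeCFC : Prop := ∀ (CFCs : List (Int × List Int)) (A : List (Option Int)) (C : List Bool) (v : Int), Dom_addVerticeCFC CFCs A C v → Pre_addVerticeCFC CFCs A C v → Spec_addVerticeCFC CFCs A C v (addVerticeCFC CFCs A C v)

-- ===== LEMMAS AND PROOFS =====
-- A's recursion equals B's collect-then-mark phases, for every fuel (no precondition
-- needed: both ports bail out identically where Python would raise).
-- the interleaved update of A's unwind step is exactly one pvMarkOne application
theorem pv_if_markOne (st : PySem.Dict Int (List Int) × List Bool) (root v : Int) :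
    (if PySem.List.pyGet? st.2 v = some false then
       (PySem.Dict.modify st.1 (root + 1) [] (· ++ [v + 1]), PySem.List.pySetD st.2 v true, root)
     else (st.1, st.2, root)) =
    ((pvMarkOne root st v).1, (pvMarkOne root st v).2, root) := by
  simp only [pvMarkOne]; split <;> rfl

theorem go_eq_walk (A : List (Option Int)) (fuel : Nat) (CFCs : PySem.Dict Int (List Int)) (C : List Bool) (v : Int) :
    addVerticeCFC_go A fuel CFCs C v =
      (let cw := pvChainWalk A fuel v
       let st0 :=
         if PySem.List.pyGet? C cw.2 = some false then
           (PySem.Dict.insert CFCs (cw.2 + 1) [cw.2 + 1], PySem.List.pySetD C cw.2 true)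
         else (CFCs, C)
       let st := cw.1.reverse.foldl (pvMarkOne cw.2) st0
       (st.1, st.2, cw.2)) := by
  induction fuel generalizing v with
  | zero =>
    simp only [addVerticeCFC_go, pvChainWalk, List.reverse_nil, List.foldl_nil]
    split <;> rfl
  | succ fuel' ih =>
    cases hp : PySem.List.pyGetD A v none with
    | none =>
      simp only [addVerticeCFC_go, pvChainWalk, hp, List.reverse_nil, List.foldl_nil]
      split <;> rfl
    | some p =>
      simp only [addVerticeCFC_go, pvChainWalk, hp, ih (p - 1),
        List.reverse_cons, List.foldl_append, List.foldl_cons, List.foldl_nil]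
      exact pv_if_markOne _ _ _

-- ===== VERDICT (by name: the statement is the Claim_ definition above) =====
theorem addVerticeCFC_spec : Claim_equal_addVerticeCFC := by
  intro CFCs A C v _ _
  unfold Spec_addVerticeCFC addVerticeCFC addVerticeCFC_alt
  rw [go_eq_walk]
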